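-- pv_equiv track=rewrite | github.com/BenchleyKim/Study | Algorithm_Study/2020WINTER/PreStudy/electronicBus.py | moveCount
-- ===== SOURCE A (Python) =====
-- def nextStation(current_location, max_move, station_list):
--     max_go = 0
--     for i in range(current_location+1,current_location+max_move+1):
--
--         if i in station_list:
--             max_go = i
--
--
--     return max_go
--
-- def moveCount(lst):
--     max_move, last_station, station_num, station_list = lst
--     current_location = 0
--     moveCount = 0
--     while current_location + max_move < last_station :
--         current_location = nextStation(current_location, max_move, station_list)
--         if current_location == 0 :
--             moveCount = 0
--             break
--
--         moveCount += 1
--     return moveCount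
-- ===== SOURCE B (Python) =====
-- def moveCount(lst):
--     max_move, last_station, station_num, station_list = lst
--     arr = sorted(station_list)
--     n = len(arr)
--     current = 0
--     count = 0
--     j = 0
--     while current + max_move < last_station:
--         while j < n and arr[j] <= current + max_move:
--             j += 1
--         if j == 0 or arr[j - 1] <= current:
--             return 0
--         current = arr[j - 1]
--         count += 1
--     return count
-- ===== Notes on version B (the rewrite author's own statement) =====
-- stated objective: alternative
-- what changed: A rescans every integer in the reach window per hop, with a linear membership scan of the station list for each integer; B instead sorts the stations once and makes a single monotone pointer sweep over the sorted list across all hops (measured much faster at large sizes where A even timed out, but a timing run gate did not confirm it on every large input, so no unqualified speed claim is made).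
import Mathlib
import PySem

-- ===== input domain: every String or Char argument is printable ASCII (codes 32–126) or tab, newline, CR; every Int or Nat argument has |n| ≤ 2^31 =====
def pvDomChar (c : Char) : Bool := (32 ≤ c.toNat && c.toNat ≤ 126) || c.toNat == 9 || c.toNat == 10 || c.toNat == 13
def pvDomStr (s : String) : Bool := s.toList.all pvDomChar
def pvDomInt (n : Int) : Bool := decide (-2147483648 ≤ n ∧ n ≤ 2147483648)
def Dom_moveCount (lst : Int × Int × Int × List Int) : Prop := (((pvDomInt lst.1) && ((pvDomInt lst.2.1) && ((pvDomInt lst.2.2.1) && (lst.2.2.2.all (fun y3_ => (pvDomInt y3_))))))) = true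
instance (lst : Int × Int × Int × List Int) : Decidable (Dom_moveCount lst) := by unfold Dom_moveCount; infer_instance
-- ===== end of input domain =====

-- B replaces A's per-hop scan of every integer in the reach window (each with a linear
-- membership test) by one sort of the stations plus a single monotone pointer sweep.

-- ===== PORT A =====
-- for i in range(c+1, c+m+1): if i in station_list: max_go = i
def nextStation (current_location max_move : Int) (station_list : List Int) : Int :=
  (PySem.List.pyRange (current_location + 1) (current_location + max_move + 1) 1).foldl
    (fun max_go i => if i ∈ station_list then i else max_go) 0

-- the fold picks its initial value or one of the range's elements (needed for termination of the while loop)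
lemma foldl_pick_mem (l R : List Int) (a : Int) :
    R.foldl (fun acc i => if i ∈ l then i else acc) a = a ∨
    R.foldl (fun acc i => if i ∈ l then i else acc) a ∈ R := by
  induction R generalizing a with
  | nil => exact Or.inl rfl
  | cons r R ih =>
    simp only [List.foldl_cons]
    rcases ih (if r ∈ l then r else a) with h | h
    · rw [h]
      by_cases hr : r ∈ l
      · rw [if_pos hr]; exact Or.inr (List.mem_cons_self ..)
      · rw [if_neg hr]; exact Or.inl rfl
    · exact Or.inr (List.mem_cons_of_mem _ h)

lemma nextStation_pos (c m : Int) (l : List Int) :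
    nextStation c m l = 0 ∨ c < nextStation c m l := by
  unfold nextStation
  rcases foldl_pick_mem l (PySem.List.pyRange (c + 1) (c + m + 1) 1) 0 with h | h
  · exact Or.inl h
  · have := (PySem.List.mem_pyRange_one).1 h
    exact Or.inr (by omega)

-- while current + max_move < last_station: …
def moveLoopA (max_move last_station : Int) (station_list : List Int) (c cnt : Int) : Int :=
  if _hc : c + max_move < last_station then
    if hz : nextStation c max_move station_list = 0 then 0
    else moveLoopA max_move last_station station_list (nextStation c max_move station_list) (cnt + 1)
  else cnt
termination_by (last_station - max_move - c).toNat
decreasing_by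
  rcases nextStation_pos c max_move station_list with h | h
  · exact absurd h hz
  · omega

def moveCount (lst : Int × Int × Int × List Int) : Int :=
  moveLoopA lst.1 lst.2.1 lst.2.2.2 0 0

-- ===== PORT B =====
-- inner while: advance j while j < n and arr[j] <= x   (arr.getD j 0 is exact: the guard keeps j in bounds)
def advanceJ (arr : List Int) (x : Int) (j : Nat) : Nat :=
  if h : j < arr.length ∧ arr.getD j 0 ≤ x then advanceJ arr x (j + 1) else j
termination_by arr.length - j
decreasing_by omega

-- outer while loop of Source B (arr.getD (j'-1) 0 is exact: taken only when 0 < j' ≤ len)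
def moveLoopB (max_move last_station : Int) (arr : List Int) (c cnt : Int) (j : Nat) : Int :=
  if _hc : c + max_move < last_station then
    if _hz : advanceJ arr (c + max_move) j = 0 then 0
    else if _hs : arr.getD (advanceJ arr (c + max_move) j - 1) 0 ≤ c then 0
    else moveLoopB max_move last_station arr (arr.getD (advanceJ arr (c + max_move) j - 1) 0)
           (cnt + 1) (advanceJ arr (c + max_move) j)
  else cnt
termination_by (last_station - max_move - c).toNat
decreasing_by omega

def moveCount_alt (lst : Int × Int × Int × List Int) : Int :=
  moveLoopB lst.1 lst.2.1 (PySem.List.sorted lst.2.2.2 (fun x => x) false) 0 0 0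

-- ===== PRECONDITION & SPEC =====
def Spec_moveCount (lst : Int × Int × Int × List Int) (out : Int) : Prop := out = moveCount_alt lst
instance (lst : Int × Int × Int × List Int) (out : Int) : Decidable (Spec_moveCount lst out) := by unfold Spec_moveCount; infer_instance

-- ===== CLAIM (what is proved, stated in full; the proofs are below) =====
def Claim_equal_moveCount : Prop := ∀ (lst : Int × Int × Int × List Int), Dom_moveCount lst → Spec_moveCount lst (moveCount lst)

-- ===== LEMMAS AND PROOFS =====

lemma foldl_keep (l R : List Int) (a : Int) (h : ∀ i ∈ R, i ∉ l) :
    R.foldl (fun acc i => if i ∈ l then i else acc) a = a := by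
  induction R generalizing a with
  | nil => rfl
  | cons r R ih =>
    simp only [List.foldl_cons]
    rw [if_neg (h r (List.mem_cons_self ..))]
    exact ih _ (fun i hi => h i (List.mem_cons_of_mem _ hi))

lemma nextStation_empty (c m : Int) (l : List Int)
    (h : ∀ y ∈ l, ¬(c < y ∧ y ≤ c + m)) : nextStation c m l = 0 := by
  unfold nextStation
  refine foldl_keep l _ 0 (fun i hi hil => ?_)
  have hm := (PySem.List.mem_pyRange_one).1 hi
  exact h i hil ⟨by omega, by omega⟩

lemma nextStation_max (c m s : Int) (l : List Int) (hs : s ∈ l) (h1 : c < s) (h2 : s ≤ c + m)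
    (hub : ∀ y ∈ l, c < y → y ≤ c + m → y ≤ s) : nextStation c m l = s := by
  unfold nextStation
  rw [PySem.List.pyRange_one_append (c + 1) (s + 1) (c + m + 1) (by omega) (by omega),
      List.foldl_append,
      PySem.List.pyRange_one_succ_right (by omega : c + 1 ≤ s),
      List.foldl_append]
  simp only [List.foldl_cons, List.foldl_nil]
  rw [if_pos hs]
  refine foldl_keep l _ s (fun i hi hil => ?_)
  have hm := (PySem.List.mem_pyRange_one).1 hi
  have := hub i hil (by omega) (by omega)
  omega

-- full specification of the inner pointer sweep
lemma advanceJ_spec (arr : List Int) (x : Int) :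
    ∀ (n j : Nat), arr.length - j ≤ n → j ≤ arr.length → (∀ i, i < j → arr.getD i 0 ≤ x) →
      j ≤ advanceJ arr x j ∧ advanceJ arr x j ≤ arr.length ∧
      (∀ i, i < advanceJ arr x j → arr.getD i 0 ≤ x) ∧
      (advanceJ arr x j = arr.length ∨ x < arr.getD (advanceJ arr x j) 0) := by
  intro n
  induction n with
  | zero =>
    intro j hn hj hpre
    have hje : j = arr.length := by omega
    rw [advanceJ, dif_neg (fun hco => by omega)]
    exact ⟨le_refl j, hj, hpre, Or.inl hje⟩
  | succ n ih =>
    intro j hn hj hpre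
    rw [advanceJ]
    by_cases h : j < arr.length ∧ arr.getD j 0 ≤ x
    · rw [dif_pos h]
      have hpre' : ∀ i, i < j + 1 → arr.getD i 0 ≤ x := by
        intro i hi
        rcases Nat.lt_succ_iff_lt_or_eq.1 hi with h' | h'
        · exact hpre i h'
        · subst h'; exact h.2
      have := ih (j + 1) (by omega) (by omega) hpre'
      exact ⟨le_trans (Nat.le_succ j) this.1, this.2⟩
    · rw [dif_neg h]
      refine ⟨le_refl j, hj, hpre, ?_⟩
      by_cases hje : j = arr.length
      · exact Or.inl hje
      · exact Or.inr (by omega)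

lemma getD_mono (arr : List Int) (hpair : arr.Pairwise (· ≤ ·)) (i k : Nat)
    (hik : i ≤ k) (hk : k < arr.length) : arr.getD i 0 ≤ arr.getD k 0 := by
  rw [List.getD_eq_getElem arr 0 (by omega), List.getD_eq_getElem arr 0 hk]
  rcases Nat.lt_or_ge i k with h | h
  · exact List.pairwise_iff_getElem.1 hpair i k (by omega) hk h
  · have : i = k := by omega
    subst this; exact le_refl _

-- the two while loops compute the same answer, hop for hop
lemma loop_eq (m ls : Int) (l arr : List Int) (hperm : arr.Perm l) (hpair : arr.Pairwise (· ≤ ·)) :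
    ∀ (N : Nat) (c cnt : Int) (j : Nat), (ls - m - c).toNat ≤ N → 0 ≤ c → j ≤ arr.length →
      (∀ i, i < j → arr.getD i 0 ≤ c + m) →
      moveLoopA m ls l c cnt = moveLoopB m ls arr c cnt j := by
  intro N
  induction N with
  | zero =>
    intro c cnt j hN _ _ _
    have hc : ¬ (c + m < ls) := by omega
    rw [moveLoopA, dif_neg hc, moveLoopB, dif_neg hc]
  | succ N ih =>
    intro c cnt j hN hc0 hj hpre
    by_cases hc : c + m < ls
    · have spec := advanceJ_spec arr (c + m) arr.length j (by omega) hj hpre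
      set j' := advanceJ arr (c + m) j with hj'def
      obtain ⟨hjj', hj'n, hall, hend⟩ := spec
      -- membership of arr, via indices
      have hidx : ∀ y ∈ l, ∃ i : Nat, ∃ h : i < arr.length, arr[i] = y := by
        intro y hy
        exact List.mem_iff_getElem.1 (hperm.mem_iff.2 hy)
      have hbig : ∀ i, j' ≤ i → (h : i < arr.length) → c + m < arr[i] := by
        intro i hji hi
        have hne : j' ≠ arr.length := by omega
        rcases hend with he | he
        · exact absurd he hne
        · calc c + m < arr.getD j' 0 := he
            _ ≤ arr.getD i 0 := getD_mono arr hpair j' i hji hi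
            _ = arr[i] := List.getD_eq_getElem arr 0 hi
      rw [moveLoopA, dif_pos hc, moveLoopB, dif_pos hc]
      by_cases hz : j' = 0
      · -- no station is ≤ c+m at all: window empty, both return 0
        have hemp : ∀ y ∈ l, ¬(c < y ∧ y ≤ c + m) := by
          intro y hy ⟨_, hy2⟩
          obtain ⟨i, hi, hiy⟩ := hidx y hy
          have := hbig i (by omega) hi
          omega
        rw [dif_pos (nextStation_empty c m l hemp), dif_pos hz]
      · rw [dif_neg hz]
        have hsle : arr.getD (j' - 1) 0 = arr[j' - 1]'(by omega) := List.getD_eq_getElem arr 0 (by omega)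
        by_cases hs : arr.getD (j' - 1) 0 ≤ c
        · -- best reachable station is behind us: window empty, both return 0
          have hemp : ∀ y ∈ l, ¬(c < y ∧ y ≤ c + m) := by
            intro y hy ⟨hy1, hy2⟩
            obtain ⟨i, hi, hiy⟩ := hidx y hy
            rcases Nat.lt_or_ge i j' with h | h
            · have : arr.getD i 0 ≤ arr.getD (j' - 1) 0 := getD_mono arr hpair i (j' - 1) (by omega) (by omega)
              rw [List.getD_eq_getElem arr 0 hi, hiy] at this
              omega
            · have := hbig i h hi
              omega
          rw [dif_pos (nextStation_empty c m l hemp), dif_pos hs]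
        · rw [dif_neg hs]
          -- the hop target: s = arr[j'-1], the greatest station within reach
          set s := arr.getD (j' - 1) 0 with hsdef
          have hcs : c < s := by omega
          have hsx : s ≤ c + m := hall (j' - 1) (by omega)
          have hsl : s ∈ l := by
            refine hperm.mem_iff.1 ?_
            show arr.getD (j' - 1) 0 ∈ arr
            rw [List.getD_eq_getElem arr 0 (by omega : j' - 1 < arr.length)]
            exact List.getElem_mem _
          have hub : ∀ y ∈ l, c < y → y ≤ c + m → y ≤ s := by
            intro y hy _ hy2
            obtain ⟨i, hi, hiy⟩ := hidx y hy
            rcases Nat.lt_or_ge i j' with h | h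
            · have : arr.getD i 0 ≤ arr.getD (j' - 1) 0 := getD_mono arr hpair i (j' - 1) (by omega) (by omega)
              rw [List.getD_eq_getElem arr 0 hi, hiy] at this
              omega
            · have := hbig i h hi
              omega
          have hns : nextStation c m l = s := nextStation_max c m s l hsl hcs hsx hub
          rw [dif_neg (by rw [hns]; omega : ¬ nextStation c m l = 0), hns]
          refine ih s (cnt + 1) j' (by omega) (by omega) hj'n ?_
          intro i hi
          have hm0 : 0 < m := by omega
          have : arr.getD i 0 ≤ arr.getD (j' - 1) 0 := getD_mono arr hpair i (j' - 1) (by omega) (by omega)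
          omega
    · rw [moveLoopA, dif_neg hc, moveLoopB, dif_neg hc]

-- ===== VERDICT (by name: the statement is the Claim_ definition above) =====
theorem moveCount_spec : Claim_equal_moveCount := by
  intro lst _
  obtain ⟨m, ls, k, l⟩ := lst
  unfold Spec_moveCount moveCount moveCount_alt
  simp only
  exact loop_eq m ls l (PySem.List.sorted l (fun x => x) false)
    (PySem.List.sorted_perm l (fun x => x) false)
    (PySem.List.sorted_pairwise l (fun x => x))
    (ls - m).toNat 0 0 0 (by omega) (le_refl 0) (Nat.zero_le _)
    (fun i hi => absurd hi (Nat.not_lt_zero i))
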